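-- pv_equiv track=rewrite | github.com/Feng-12138/LooSchedule | data/scraper/courses/getCourseFromUWflow.py | addSpaceToStr
-- ===== SOURCE A (Python) =====
-- def addSpaceToStr(strList: list):
--     retval = []
--     for item in strList:
--         splitIdx = 0
--         for idx, char in enumerate(item):
--             if char >= '0' and char <= '9':
--                 splitIdx = idx
--                 break
--         courseStrNoSpace = item[:splitIdx] + ' ' + item[splitIdx:]
--         retval.append(courseStrNoSpace.strip())
--     return retval
-- ===== SOURCE B (Python) =====
-- def addSpaceToStr(strList: list):
--     retval = []
--     for item in strList:
--         hits = [item.find(d) for d in '0123456789' if d in item]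
--         i = min(hits, default=0)
--         retval.append((item[:i] + ' ' + item[i:]).strip())
--     return retval
-- ===== Notes on version B (the rewrite author's own statement) =====
-- stated objective: alternative
-- what changed: B locates the first digit by running a substring search (str.find) for each of the ten digit characters and taking the min of the hit positions (default 0), instead of A's indexed per-character scan with break.
import Mathlib
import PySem

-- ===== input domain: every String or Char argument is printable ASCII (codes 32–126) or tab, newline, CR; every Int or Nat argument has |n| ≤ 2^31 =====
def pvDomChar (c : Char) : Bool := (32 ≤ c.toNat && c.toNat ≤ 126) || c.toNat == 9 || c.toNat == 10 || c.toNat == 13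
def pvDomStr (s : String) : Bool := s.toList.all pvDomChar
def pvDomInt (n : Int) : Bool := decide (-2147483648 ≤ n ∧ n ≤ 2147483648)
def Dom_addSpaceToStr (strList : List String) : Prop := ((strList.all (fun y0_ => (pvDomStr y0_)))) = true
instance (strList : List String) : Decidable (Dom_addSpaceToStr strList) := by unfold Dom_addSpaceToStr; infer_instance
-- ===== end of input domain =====

-- B computes the first-digit index via per-digit substring search (str.find + min) instead of A's
-- indexed character scan with break; equal return values, an alternative decomposition.
-- ===== PORT A =====
def aFindLoop : List (Int × Char) → Int
  | [] => 0
  | (i, c) :: rest => if '0' ≤ c ∧ c ≤ '9' then i else aFindLoop rest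

def addSpaceToStr (strList : List String) : List String :=
  strList.foldl (fun retval item =>
    let cs := item.toList
    let splitIdx := aFindLoop (PySem.List.enumerate cs)
    let courseStrNoSpace :=
      PySem.List.slice cs none (some splitIdx) ++ ' ' :: PySem.List.slice cs (some splitIdx) none
    retval ++ [String.ofList (PySem.Chars.strip courseStrNoSpace)]) []

-- ===== PORT B =====
def bDigits : List Char := ['0','1','2','3','4','5','6','7','8','9']

def bHits (cs : List Char) : List Int :=
  (bDigits.filter (fun d => PySem.Chars.isIn [d] cs)).map (fun d => PySem.Chars.find cs [d])

def addSpaceToStr_alt (strList : List String) : List String :=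
  strList.map (fun item =>
    let cs := item.toList
    let i := PySem.List.minD (bHits cs) (fun x => x) 0
    String.ofList (PySem.Chars.strip
      (PySem.List.slice cs none (some i) ++ ' ' :: PySem.List.slice cs (some i) none)))

-- ===== PRECONDITION & SPEC =====
def Spec_addSpaceToStr (strList : List String) (out : List String) : Prop := out = addSpaceToStr_alt strList
instance (strList : List String) (out : List String) : Decidable (Spec_addSpaceToStr strList out) := by unfold Spec_addSpaceToStr; infer_instance

-- ===== CLAIM (what is proved, stated in full; the proofs are below) =====
def Claim_equal_addSpaceToStr : Prop := ∀ (strList : List String), Dom_addSpaceToStr strList → Spec_addSpaceToStr strList (addSpaceToStr strList)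

-- ===== LEMMAS AND PROOFS =====
def pvDig (c : Char) : Bool := decide ('0' ≤ c ∧ c ≤ '9')

lemma singleton_prefix_iff_head (d : Char) (l : List Char) : [d] <+: l ↔ l.head? = some d := by
  constructor
  · rintro ⟨t, rfl⟩; rfl
  · intro h
    cases l with
    | nil => simp at h
    | cons a t =>
      obtain rfl : a = d := by simpa using h
      exact ⟨t, rfl⟩

lemma mem_bDigits_iff (c : Char) : c ∈ bDigits ↔ pvDig c = true := by
  constructor
  · intro h
    fin_cases h <;> decide
  · intro h
    have hp : '0' ≤ c ∧ c ≤ '9' := by simpa [pvDig] using h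
    have a1 : 48 ≤ c.toNat := hp.1
    have a2 : c.toNat ≤ 57 := hp.2
    interval_cases hn : c.toNat <;>
      (have hc := (Char.ofNat_toNat c).symm; rw [hn] at hc; rw [hc]; decide)

lemma aLoop_eq (cs : List Char) (n : Int) :
    aFindLoop (PySem.List.enumerate cs n)
      = if cs.any pvDig then n + (cs.findIdx pvDig : Int) else 0 := by
  induction cs generalizing n with
  | nil => simp [PySem.List.enumerate_nil, aFindLoop]
  | cons c rest ih =>
    rw [PySem.List.enumerate_cons]
    by_cases hc : pvDig c = true
    · have hp : '0' ≤ c ∧ c ≤ '9' := by simpa [pvDig] using hc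
      simp [aFindLoop, hp, hc, List.findIdx_cons]
    · have hp : ¬ ('0' ≤ c ∧ c ≤ '9') := by simpa [pvDig] using hc
      have hcf : pvDig c = false := by simpa using hc
      show (if '0' ≤ c ∧ c ≤ '9' then n else aFindLoop (PySem.List.enumerate rest (n + 1)))
        = _
      rw [if_neg hp, ih]
      by_cases hr : rest.any pvDig = true
      · simp only [List.any_cons, hcf, hr, Bool.false_or, if_pos, List.findIdx_cons,
          Bool.cond_eq_ite]
        push_cast
        ring
      · simp [List.any_cons, hcf, hr]

lemma hits_le (cs : List Char) :
    ∀ v ∈ bHits cs, ((cs.findIdx pvDig : Nat) : Int) ≤ v := by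
  intro v hv
  unfold bHits at hv
  simp only [List.mem_map, List.mem_filter] at hv
  obtain ⟨d, ⟨hdm, hdin⟩, rfl⟩ := hv
  have hinf : [d] <:+: cs := (PySem.Chars.isIn_iff_infix _ _).mp hdin
  have hnn : (0 : Int) ≤ PySem.Chars.find cs [d] := (PySem.Chars.find_nonneg_iff _ _).mpr hinf
  obtain ⟨hpre, -⟩ := PySem.Chars.find_spec hnn
  have hget : cs[(PySem.Chars.find cs [d]).toNat]? = some d := by
    rw [← List.head?_drop]
    exact ((singleton_prefix_iff_head d _).mp hpre)
  obtain ⟨ht, hval⟩ := List.getElem?_eq_some_iff.mp hget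
  have hdig : pvDig cs[(PySem.Chars.find cs [d]).toNat] = true := by
    rw [hval]; exact (mem_bDigits_iff d).mp hdm
  have hle : cs.findIdx pvDig ≤ (PySem.Chars.find cs [d]).toNat := by
    by_contra hlt
    have := List.not_of_lt_findIdx (by omega : (PySem.Chars.find cs [d]).toNat < cs.findIdx pvDig)
    exact absurd (this.symm.trans hdig) (by decide)
  omega

lemma findIdx_mem_hits (cs : List Char) (h : cs.any pvDig = true) :
    ((cs.findIdx pvDig : Nat) : Int) ∈ bHits cs := by
  have hj : cs.findIdx pvDig < cs.length :=
    List.findIdx_lt_length.mpr (by simpa [List.any_eq_true] using h)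
  set j := cs.findIdx pvDig with hjdef
  have hdig : pvDig cs[j] = true := List.findIdx_getElem (w := hj)
  have hdm : cs[j] ∈ bDigits := (mem_bDigits_iff _).mpr hdig
  have hmem : cs[j] ∈ cs := List.getElem_mem hj
  have hin : PySem.Chars.isIn [cs[j]] cs = true :=
    (PySem.Chars.isIn_iff_infix _ _).mpr ((List.singleton_infix_iff _ _).mpr hmem)
  have hfind : PySem.Chars.find cs [cs[j]] = (j : Int) := by
    have hnn : (0 : Int) ≤ PySem.Chars.find cs [cs[j]] :=
      (PySem.Chars.find_nonneg_iff _ _).mpr ((List.singleton_infix_iff _ _).mpr hmem)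
    obtain ⟨hpre, hmin⟩ := PySem.Chars.find_spec hnn
    have hget : cs[(PySem.Chars.find cs [cs[j]]).toNat]? = some cs[j] := by
      rw [← List.head?_drop]
      exact ((singleton_prefix_iff_head _ _).mp hpre)
    obtain ⟨ht, hval⟩ := List.getElem?_eq_some_iff.mp hget
    have h1 : j ≤ (PySem.Chars.find cs [cs[j]]).toNat := by
      by_contra hlt
      have hfalse := List.not_of_lt_findIdx
        (by omega : (PySem.Chars.find cs [cs[j]]).toNat < cs.findIdx pvDig)
      have hd2 : pvDig cs[(PySem.Chars.find cs [cs[j]]).toNat] = true := by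
        rw [hval]; exact hdig
      exact absurd (hfalse.symm.trans hd2) (by decide)
    have h2 : ¬ j < (PySem.Chars.find cs [cs[j]]).toNat := by
      intro hlt
      apply hmin j hlt
      rw [singleton_prefix_iff_head, List.head?_drop]
      exact (List.getElem?_eq_some_iff.mpr ⟨hj, rfl⟩)
    omega
  unfold bHits
  simp only [List.mem_map, List.mem_filter]
  exact ⟨cs[j], ⟨hdm, hin⟩, hfind⟩

lemma hits_nil (cs : List Char) (h : cs.any pvDig = false) : bHits cs = [] := by
  unfold bHits
  rw [List.filter_eq_nil_iff.mpr, List.map_nil]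
  intro d hdm
  simp only [Bool.not_eq_true]
  by_contra hin
  have hmem : d ∈ cs := (List.singleton_infix_iff _ _).mp
    ((PySem.Chars.isIn_iff_infix _ _).mp (by simpa using hin))
  have : cs.any pvDig = true := List.any_eq_true.mpr ⟨d, hmem, (mem_bDigits_iff d).mp hdm⟩
  simp [this] at h

lemma minD_hits_eq (cs : List Char) :
    PySem.List.minD (bHits cs) (fun x => x) 0
      = if cs.any pvDig then (cs.findIdx pvDig : Int) else 0 := by
  by_cases h : cs.any pvDig = true
  · rw [if_pos h]
    have hjm := findIdx_mem_hits cs h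
    have hne : bHits cs ≠ [] := by
      intro hnil; rw [hnil] at hjm; simp at hjm
    obtain ⟨m, hm⟩ : ∃ m, PySem.List.min? (bHits cs) (fun x => x) = some m := by
      cases hq : PySem.List.min? (bHits cs) (fun x => x) with
      | none => exact absurd ((PySem.List.min?_eq_none_iff _ _).mp hq) hne
      | some m => exact ⟨m, rfl⟩
    have hmm : m ∈ bHits cs := PySem.List.min?_mem hm
    have h1 : m ≤ (cs.findIdx pvDig : Int) := PySem.List.min?_isMin hm _ hjm
    have h2 : (cs.findIdx pvDig : Int) ≤ m := hits_le cs m hmm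
    have : m = (cs.findIdx pvDig : Int) := le_antisymm h1 h2
    rw [PySem.List.minD, hm, Option.getD_some, this]
  · rw [if_neg h, hits_nil cs (by simpa using h)]
    rfl

-- ===== VERDICT (by name: the statement is the Claim_ definition above) =====
theorem addSpaceToStr_spec : Claim_equal_addSpaceToStr := by
  intro strList _
  unfold Spec_addSpaceToStr addSpaceToStr addSpaceToStr_alt
  rw [PySem.List.foldl_append_singleton_eq_map]
  simp only [List.nil_append]
  apply List.map_congr_left
  intro item _
  have hA := aLoop_eq item.toList 0
  rw [hA, minD_hits_eq]
  split <;> simp
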